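-- pv_equiv track=rewrite | github.com/gitpark1/python_ | programmers1/32.py | solution
-- ===== SOURCE A (Python) =====
-- def solution(s):
--     t_list=s.split(' ')
--     sample=''
--     for i in t_list:
--         for x in range(len(i)):
--             if x%2==0:
--                 sample+=i[x].upper()
--             else:
--                 sample+=i[x].lower()
--         sample+=' '
--     answer=sample[:-1]
--     return answer
-- ===== SOURCE B (Python) =====
-- def solution(s):
--     out = []
--     k = 0
--     for c in s:
--         if c == ' ':
--             out.append(' ')
--             k = 0
--         else:
--             out.append(c.upper() if k % 2 == 0 else c.lower())
--             k += 1
--     return ''.join(out)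
-- ===== Notes on version B (the rewrite author's own statement) =====
-- stated objective: simpler
-- what changed: Replaced split-into-words + nested index loop + join-and-trim with one flat scan over the string keeping a position counter that resets on each space.
import Mathlib
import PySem

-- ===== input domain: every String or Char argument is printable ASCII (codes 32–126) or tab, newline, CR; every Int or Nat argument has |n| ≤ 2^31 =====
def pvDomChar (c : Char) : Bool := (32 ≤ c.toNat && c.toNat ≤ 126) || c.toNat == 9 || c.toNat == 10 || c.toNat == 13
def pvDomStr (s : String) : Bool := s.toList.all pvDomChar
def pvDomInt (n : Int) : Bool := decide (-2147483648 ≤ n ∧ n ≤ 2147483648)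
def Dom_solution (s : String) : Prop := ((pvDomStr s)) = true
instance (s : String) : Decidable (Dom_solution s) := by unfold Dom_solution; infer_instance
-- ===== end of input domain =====

-- B replaces A's split-into-words + nested index loop + join-and-trim by one flat
-- scan with a position counter that resets on spaces (objective: simpler).

-- ===== PORT A =====
def solution (s : String) : String :=
  let t_list := PySem.Chars.splitOn s.toList [' ']
  let sample := t_list.foldl (fun sample i =>
    ((PySem.List.pyRange 0 (PySem.List.len i)).foldl (fun sample x =>
      if x % 2 == 0 then sample ++ [PySem.Chars.upperChar (PySem.List.pyGetD i x ' ')]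
      else sample ++ [PySem.Chars.lowerChar (PySem.List.pyGetD i x ' ')]) sample) ++ [' ']) []
  String.ofList (PySem.List.slice sample none (some (-1)))

-- ===== PORT B =====
def solution_alt (s : String) : String :=
  let r := s.toList.foldl (fun (p : List Char × Nat) c =>
    if c = ' ' then (p.1 ++ [' '], 0)
    else (p.1 ++ [if p.2 % 2 == 0 then PySem.Chars.upperChar c else PySem.Chars.lowerChar c],
          p.2 + 1)) ([], 0)
  String.ofList r.1

-- ===== PRECONDITION & SPEC =====
def Spec_solution (s : String) (out : String) : Prop := out = solution_alt s
instance (s : String) (out : String) : Decidable (Spec_solution s out) := by unfold Spec_solution; infer_instance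

-- ===== CLAIM (what is proved, stated in full; the proofs are below) =====
def Claim_equal_solution : Prop := ∀ (s : String), Dom_solution s → Spec_solution s (solution s)

-- ===== LEMMAS AND PROOFS =====

/-- character transform at word-position `k` -/
def pvG (k : Nat) (c : Char) : Char :=
  if k % 2 == 0 then PySem.Chars.upperChar c else PySem.Chars.lowerChar c

/-- word processed with starting counter `k` -/
def pvPw : Nat → List Char → List Char
  | _, [] => []
  | k, c :: cs => pvG k c :: pvPw (k + 1) cs

/-- the flat-scan spec: counter resets on spaces -/
def pvF : List Char → Nat → List Char
  | [], _ => []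
  | c :: cs, k => if c = ' ' then ' ' :: pvF cs 0 else pvG k c :: pvF cs (k + 1)

/-- structural version of split on a single space -/
def pvSplit : List Char → List Char → List (List Char)
  | cur, [] => [cur]
  | cur, c :: rest => if c = ' ' then cur :: pvSplit [] rest else pvSplit (cur ++ [c]) rest

theorem pvGo_spec (fuel : Nat) (l cur : List Char) (acc : List (List Char)) (h : l.length ≤ fuel) :
    PySem.Chars.splitOn.go [' '] fuel l cur acc = acc.reverse ++ pvSplit cur.reverse l := by
  induction fuel generalizing l cur acc with
  | zero =>
    have : l = [] := List.eq_nil_of_length_eq_zero (Nat.le_zero.mp h)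
    subst this
    simp [PySem.Chars.splitOn.go, pvSplit]
  | succ fuel ih =>
    cases l with
    | nil => simp [PySem.Chars.splitOn.go, pvSplit]
    | cons c rest =>
      by_cases hc : c = ' '
      · subst hc
        have : ([' '] : List Char).isPrefixOf (' ' :: rest) = true := by
          simp [List.isPrefixOf]
        simp only [PySem.Chars.splitOn.go, this]
        rw [ih _ _ _ (by simpa using Nat.le_of_succ_le_succ h)]
        simp [pvSplit]
      · have : ([' '] : List Char).isPrefixOf (c :: rest) = false := by
          simp [List.isPrefixOf]
          exact fun hh => absurd hh.symm hc
        simp only [PySem.Chars.splitOn.go, this, Bool.false_eq_true, if_false]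
        rw [ih _ _ _ (by simpa using Nat.le_of_succ_le_succ h),
            show pvSplit cur.reverse (c :: rest) = pvSplit (cur.reverse ++ [c]) rest from by
              simp [pvSplit, hc],
            List.reverse_cons]

theorem pvSplitOn_eq (cs : List Char) :
    PySem.Chars.splitOn cs [' '] = pvSplit [] cs := by
  unfold PySem.Chars.splitOn
  rw [pvGo_spec _ _ _ _ (by omega)]
  simp

theorem pvPw_append (k : Nat) (xs : List Char) (c : Char) :
    pvPw k (xs ++ [c]) = pvPw k xs ++ [pvG (k + xs.length) c] := by
  induction xs generalizing k with
  | nil => simp [pvPw]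
  | cons x xs ih =>
    simp [pvPw, ih (k + 1)]
    ring_nf

/-- the inner `for x in range(len(i))` loop appends the processed word -/
theorem pvInner (suf pre sample : List Char) :
    (PySem.List.pyRange (pre.length : Int) ((pre ++ suf).length : Int)).foldl
      (fun sample x =>
        if x % 2 == 0 then sample ++ [PySem.Chars.upperChar (PySem.List.pyGetD (pre ++ suf) x ' ')]
        else sample ++ [PySem.Chars.lowerChar (PySem.List.pyGetD (pre ++ suf) x ' ')]) sample
    = sample ++ pvPw pre.length suf := by
  induction suf generalizing pre sample with
  | nil => simp [PySem.List.pyRange, pvPw]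
  | cons c rest ih =>
    rw [PySem.List.pyRange_one_cons (by simp only [List.length_append, List.length_cons]; push_cast; omega)]
    simp only [List.foldl_cons]
    have hget : PySem.List.pyGetD (pre ++ c :: rest) (pre.length : Int) ' ' = c := by
      rw [PySem.List.pyGetD_natCast]
      simp [List.getD]
    have hmod : ((pre.length : Int) % 2 == 0) = (pre.length % 2 == 0) := by
      rcases Nat.even_or_odd pre.length with h | h
      · obtain ⟨m, hm⟩ := h
        simp [hm]
        omega
      · obtain ⟨m, hm⟩ := h
        have h1 : ((pre.length : Int)) % 2 = 1 := by omega
        have h2 : pre.length % 2 = 1 := by omega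
        simp [h1, h2]
    have step : (if ((pre.length : Int) % 2 == 0)
          then sample ++ [PySem.Chars.upperChar (PySem.List.pyGetD (pre ++ c :: rest) (pre.length : Int) ' ')]
          else sample ++ [PySem.Chars.lowerChar (PySem.List.pyGetD (pre ++ c :: rest) (pre.length : Int) ' ')])
        = sample ++ [pvG pre.length c] := by
      rw [hget, hmod, pvG]
      by_cases h : (pre.length % 2 == 0) <;> simp [h]
    rw [step]
    have hlen : ((pre.length : Int) + 1) = ((pre ++ [c]).length : Int) := by simp
    have hall : pre ++ c :: rest = (pre ++ [c]) ++ rest := by simp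
    rw [hall, hlen]
    rw [ih (pre ++ [c]) (sample ++ [pvG pre.length c])]
    simp [pvPw]

/-- joining the processed split pieces with spaces equals the flat scan (plus a final space) -/
theorem pvJoin (cs cur : List Char) :
    (pvSplit cur cs).flatMap (fun w => pvPw 0 w ++ [' '])
      = pvPw 0 cur ++ pvF cs cur.length ++ [' '] := by
  induction cs generalizing cur with
  | nil => simp [pvSplit, pvF]
  | cons c rest ih =>
    by_cases hc : c = ' '
    · subst hc
      rw [show pvSplit cur (' ' :: rest) = cur :: pvSplit [] rest from by simp [pvSplit]]
      rw [List.flatMap_cons, ih []]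
      simp [pvF, pvPw]
    · simp only [pvSplit, if_neg hc]
      rw [ih (cur ++ [c])]
      rw [pvPw_append 0 cur c]
      simp [pvF, hc]

theorem pvB_loop (cs : List Char) (acc : List Char) (k : Nat) :
    (cs.foldl (fun (p : List Char × Nat) c =>
      if c = ' ' then (p.1 ++ [' '], 0)
      else (p.1 ++ [if p.2 % 2 == 0 then PySem.Chars.upperChar c else PySem.Chars.lowerChar c],
            p.2 + 1)) (acc, k)).1 = acc ++ pvF cs k := by
  induction cs generalizing acc k with
  | nil => simp [pvF]
  | cons c rest ih =>
    by_cases hc : c = ' '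
    · subst hc
      simp only [List.foldl_cons]
      rw [ih]
      simp [pvF]
    · simp only [List.foldl_cons, if_neg hc]
      rw [ih]
      simp [pvF, hc, pvG]

-- ===== VERDICT (by name: the statement is the Claim_ definition above) =====
theorem solution_spec : Claim_equal_solution := by
  intro s _
  unfold Spec_solution solution solution_alt
  dsimp only
  rw [pvSplitOn_eq]
  have houter : ∀ (ws : List (List Char)) (init : List Char),
      ws.foldl (fun sample i =>
        ((PySem.List.pyRange 0 (PySem.List.len i)).foldl (fun sample x =>
          if x % 2 == 0 then sample ++ [PySem.Chars.upperChar (PySem.List.pyGetD i x ' ')]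
          else sample ++ [PySem.Chars.lowerChar (PySem.List.pyGetD i x ' ')]) sample) ++ [' ']) init
      = init ++ ws.flatMap (fun w => pvPw 0 w ++ [' ']) := by
    intro ws init
    have hstep : ∀ (init : List Char) (i : List Char),
        ((PySem.List.pyRange 0 (PySem.List.len i)).foldl (fun sample x =>
          if x % 2 == 0 then sample ++ [PySem.Chars.upperChar (PySem.List.pyGetD i x ' ')]
          else sample ++ [PySem.Chars.lowerChar (PySem.List.pyGetD i x ' ')]) init) ++ [' ']
        = init ++ (pvPw 0 i ++ [' ']) := by
      intro init i
      have h := pvInner i [] init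
      simp only [List.nil_append, List.length_nil, Nat.cast_zero] at h
      simp only [PySem.List.len]
      rw [h]
      simp
    induction ws generalizing init with
    | nil => simp
    | cons w ws ihw =>
      simp only [List.foldl_cons, List.flatMap_cons]
      rw [hstep, ihw]
      simp
  rw [houter]
  rw [pvJoin]
  rw [pvB_loop]
  simp only [List.nil_append, List.length_nil]
  rw [PySem.List.slice_to_neg_one]
  simp [pvPw]
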